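-- pv_equiv track=rewrite | github.com/vncloudsco/splunk | lib/python3.7/site-packages/splunk/stats_util/statespace.py | findLongestContinuousStretch
-- ===== SOURCE A (Python) =====
-- def findLongestContinuousStretch(data, start, end):
--     ''' data may have missing values, denoted by None. This function returns the start and end of
--     the longest stretch without missing values.
--     '''
--     longestStart = longestEnd = start
--     currentStart = currentEnd = start
--     while currentEnd < end:
--         if data[currentEnd] != None:
--             currentEnd += 1
--         else:
--             if currentEnd-currentStart > longestEnd-longestStart:
--                 longestStart = currentStart
--                 longestEnd = currentEnd
--             currentEnd += 1
--             while currentEnd < end and data[currentEnd] == None: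
--                 currentEnd += 1
--             currentStart = currentEnd
--     if currentStart < end: # last stretch. Need to compare it to the longest one.
--         if currentEnd-currentStart > longestEnd-longestStart:
--             longestStart = currentStart
--             longestEnd = currentEnd
--     return [longestStart, longestEnd]
-- ===== SOURCE B (Python) =====
-- def findLongestContinuousStretch(data, start, end):
--     ''' data may have missing values, denoted by None. This function returns the start and end of
--     the longest stretch without missing values.
--     '''
--     breaks = [start - 1]
--     for i in range(start, end):
--         if not (data[i] != None):
--             breaks.append(i)
--     breaks.append(end)
--     bestP, bestQ = start - 1, start
--     for p, q in zip(breaks, breaks[1:]):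
--         if q - p - 1 > bestQ - bestP - 1:
--             bestP, bestQ = p, q
--     return [bestP + 1, bestQ]
-- ===== Notes on version B (the rewrite author's own statement) =====
-- stated objective: alternative
-- what changed: A's fused while-loop state machine (tracking current/longest stretch and an inner None-skipping loop) is replaced by a two-phase break-table decomposition: first collect all None positions with sentinels start-1 and end, then scan consecutive pairs for the first pair with the largest gap.
import Mathlib
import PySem

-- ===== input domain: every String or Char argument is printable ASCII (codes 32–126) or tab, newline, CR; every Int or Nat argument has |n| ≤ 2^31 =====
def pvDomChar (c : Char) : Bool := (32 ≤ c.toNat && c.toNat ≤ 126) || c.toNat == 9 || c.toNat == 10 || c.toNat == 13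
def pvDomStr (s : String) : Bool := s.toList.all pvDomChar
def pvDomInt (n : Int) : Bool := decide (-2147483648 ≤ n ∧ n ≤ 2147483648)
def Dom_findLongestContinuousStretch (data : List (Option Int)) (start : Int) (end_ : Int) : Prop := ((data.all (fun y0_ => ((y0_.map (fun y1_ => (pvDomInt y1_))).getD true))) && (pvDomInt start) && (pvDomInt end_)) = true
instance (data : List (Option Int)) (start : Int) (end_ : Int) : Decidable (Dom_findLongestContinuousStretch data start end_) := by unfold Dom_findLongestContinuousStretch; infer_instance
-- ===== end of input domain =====

-- B replaces A's fused while-loop state machine by a break-table decomposition: list the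
-- None positions (with sentinels start-1 and end) and scan consecutive pairs for the first
-- longest gap; objective: alternative decomposition, same O(n) cost.

-- ===== PORT A =====
-- shared element test: `data[i] != None` (Python wrap-around indexing; out-of-range excluded by Pre_)
def isPresent (data : List (Option Int)) (i : Int) : Bool :=
  ((PySem.List.pyGet? data i).getD none).isSome

-- inner `while currentEnd < end and data[currentEnd] == None: currentEnd += 1`
-- (fuel = number of remaining indices below end_, so the recursion is structural;
--  it is always called with fuel = (end_ - c).toNat, enough for the whole while-loop)
def aSkip (data : List (Option Int)) (end_ : Int) : Nat → Int → Int
  | 0, c => c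
  | fuel + 1, c =>
    if c < end_ ∧ isPresent data c = false then aSkip data end_ fuel (c + 1) else c

-- outer while-loop of A, state (longestStart, longestEnd, currentStart, currentEnd);
-- same fuel discipline: fuel ≥ (end_ - c).toNat, so fuel = 0 means the loop test fails
def aLoop (data : List (Option Int)) (end_ : Int) : Nat → Int → Int → Int → Int → List Int
  | 0, ls, le, cs, c =>
    if cs < end_ ∧ c - cs > le - ls then [cs, c] else [ls, le]
  | fuel + 1, ls, le, cs, c =>
    if c < end_ then
      if isPresent data c then
        aLoop data end_ fuel ls le cs (c + 1)
      else
        aLoop data end_ fuel (if c - cs > le - ls then cs else ls)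
          (if c - cs > le - ls then c else le)
          (aSkip data end_ ((end_ - (c + 1)).toNat) (c + 1))
          (aSkip data end_ ((end_ - (c + 1)).toNat) (c + 1))
    else
      if cs < end_ ∧ c - cs > le - ls then [cs, c] else [ls, le]

def findLongestContinuousStretch (data : List (Option Int)) (start : Int) (end_ : Int) : List Int :=
  aLoop data end_ ((end_ - start).toNat) start start start start

-- ===== PORT B =====
def findLongestContinuousStretch_alt (data : List (Option Int)) (start : Int) (end_ : Int) : List Int :=
  let breaks := ((PySem.List.pyRange start end_ 1).foldl
      (fun acc i => if !(isPresent data i) then acc ++ [i] else acc) [start - 1]) ++ [end_]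
  let best := (List.zip breaks (PySem.List.slice breaks (some 1) none)).foldl
      (fun (b : Int × Int) pq => if pq.2 - pq.1 - 1 > b.2 - b.1 - 1 then pq else b)
      (start - 1, start)
  [best.1 + 1, best.2]

-- ===== PRECONDITION & SPEC =====
-- Pre_ excludes exactly the inputs on which Python A raises IndexError: when the loop runs
-- (start < end), every visited index start..end-1 must be a valid Python index of data.
def Pre_findLongestContinuousStretch (data : List (Option Int)) (start : Int) (end_ : Int) : Prop :=
  start < end_ → (-(data.length : Int) ≤ start ∧ end_ ≤ (data.length : Int))
instance (data : List (Option Int)) (start : Int) (end_ : Int) : Decidable (Pre_findLongestContinuousStretch data start end_) := by unfold Pre_findLongestContinuousStretch; infer_instance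

def pvWitness_findLongestContinuousStretch : List (Option Int) × Int × Int :=
  ([some 1, none, some 2, some 3], 0, 4)

def Spec_findLongestContinuousStretch (data : List (Option Int)) (start : Int) (end_ : Int) (out : List Int) : Prop := out = findLongestContinuousStretch_alt data start end_
instance (data : List (Option Int)) (start : Int) (end_ : Int) (out : List Int) : Decidable (Spec_findLongestContinuousStretch data start end_ out) := by unfold Spec_findLongestContinuousStretch; infer_instance

-- ===== CLAIM (what is proved, stated in full; the proofs are below) =====
def Claim_equal_findLongestContinuousStretch : Prop := ∀ (data : List (Option Int)) (start : Int) (end_ : Int), Dom_findLongestContinuousStretch data start end_ → Pre_findLongestContinuousStretch data start end_ → Spec_findLongestContinuousStretch data start end_ (findLongestContinuousStretch data start end_)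

-- ===== LEMMAS AND PROOFS =====

-- proof-side abbreviations for B's pieces
def gBest (b pq : Int × Int) : Int × Int := if pq.2 - pq.1 - 1 > b.2 - b.1 - 1 then pq else b

def pairsFold (bs : List Int) (acc : Int × Int) : Int × Int :=
  (List.zip bs bs.tail).foldl gBest acc

def mkOut (p : Int × Int) : List Int := [p.1 + 1, p.2]

def nonesIn (data : List (Option Int)) (a b : Int) : List Int :=
  (PySem.List.pyRange a b 1).filter (fun i => !(isPresent data i))

theorem aSkip_ge (data : List (Option Int)) (end_ : Int) :
    ∀ (fuel : Nat) (c : Int), c ≤ aSkip data end_ fuel c := by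
  intro fuel
  induction fuel with
  | zero => intro c; simp [aSkip]
  | succ fuel ih =>
    intro c
    rw [aSkip]
    split
    · have := ih (c + 1); omega
    · omega

theorem aSkip_le (data : List (Option Int)) (end_ : Int) :
    ∀ (fuel : Nat) (c : Int), c ≤ end_ → aSkip data end_ fuel c ≤ end_ := by
  intro fuel
  induction fuel with
  | zero => intro c h; simpa [aSkip] using h
  | succ fuel ih =>
    intro c h
    rw [aSkip]
    split
    · next h' => exact ih (c + 1) (by omega)
    · exact h

theorem aSkip_none (data : List (Option Int)) (end_ : Int) :
    ∀ (fuel : Nat) (c : Int) (i : Int), c ≤ i → i < aSkip data end_ fuel c →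
      isPresent data i = false := by
  intro fuel
  induction fuel with
  | zero => intro c i h1 h2; simp [aSkip] at h2; omega
  | succ fuel ih =>
    intro c i h1 h2
    rw [aSkip] at h2
    split at h2
    · next h' =>
      rcases eq_or_lt_of_le h1 with rfl | hlt
      · exact h'.2
      · exact ih (c + 1) i (by omega) h2
    · omega

theorem nones_nil (data : List (Option Int)) (a b : Int) (h : b ≤ a) :
    nonesIn data a b = [] := by
  simp [nonesIn, PySem.List.pyRange_one_eq_nil h]

theorem nones_cons_present (data : List (Option Int)) (a b : Int) (h : a < b)
    (hp : isPresent data a = true) : nonesIn data a b = nonesIn data (a + 1) b := by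
  simp [nonesIn, PySem.List.pyRange_one_cons h, hp]

theorem nones_cons_absent (data : List (Option Int)) (a b : Int) (h : a < b)
    (hp : isPresent data a = false) : nonesIn data a b = a :: nonesIn data (a + 1) b := by
  simp [nonesIn, PySem.List.pyRange_one_cons h, hp]

theorem nones_all_absent (data : List (Option Int)) (a b : Int)
    (h : ∀ i, a ≤ i → i < b → isPresent data i = false) :
    nonesIn data a b = PySem.List.pyRange a b 1 := by
  rw [nonesIn, List.filter_eq_self]
  intro i hi
  rw [PySem.List.mem_pyRange_one] at hi
  simp [h i hi.1 hi.2]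

theorem nones_split (data : List (Option Int)) (a m b : Int) (h1 : a ≤ m) (h2 : m ≤ b) :
    nonesIn data a b = nonesIn data a m ++ nonesIn data m b := by
  rw [nonesIn, PySem.List.pyRange_one_append a m b h1 h2, List.filter_append]; rfl

theorem pairsFold_cons₂ (x y : Int) (t : List Int) (acc : Int × Int) :
    pairsFold (x :: y :: t) acc = pairsFold (y :: t) (gBest acc (x, y)) := rfl

theorem gBest_succ (a : Int) (acc : Int × Int) (h : acc.1 ≤ acc.2 - 1) :
    gBest acc (a, a + 1) = acc := by
  rw [gBest, if_neg]; omega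

theorem run_absorb_aux (rest : List Int) (acc : Int × Int) (hacc : acc.1 ≤ acc.2 - 1) :
    ∀ (k : ℕ) (a b : Int), (b - a).toNat = k → a < b →
    pairsFold (PySem.List.pyRange a b 1 ++ rest) acc = pairsFold ((b - 1) :: rest) acc := by
  intro k
  induction k with
  | zero => intro a b hk hab; omega
  | succ k ih =>
    intro a b hk hab
    rw [PySem.List.pyRange_one_cons hab]
    by_cases h2 : a + 1 < b
    · rw [PySem.List.pyRange_one_cons h2, List.cons_append, List.cons_append, pairsFold_cons₂,
        gBest_succ a acc hacc, ← List.cons_append, ← PySem.List.pyRange_one_cons h2]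
      exact ih (a + 1) b (by omega) h2
    · have hb : b = a + 1 := by omega
      subst hb
      rw [PySem.List.pyRange_one_eq_nil (by omega)]
      simp

theorem run_absorb (a b : Int) (rest : List Int) (acc : Int × Int)
    (hab : a < b) (hacc : acc.1 ≤ acc.2 - 1) :
    pairsFold (PySem.List.pyRange a b 1 ++ rest) acc = pairsFold ((b - 1) :: rest) acc :=
  run_absorb_aux rest acc hacc ((b - a).toNat) a b rfl hab

theorem exit_eq (data : List (Option Int)) (end_ ls le cs : Int)
    (hcs : cs ≤ end_) (hle : ls ≤ le) :
    (if cs < end_ ∧ end_ - cs > le - ls then [cs, end_] else [ls, le]) =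
      mkOut (pairsFold ((cs - 1) :: (nonesIn data end_ end_ ++ [end_])) (ls - 1, le)) := by
  rw [nones_nil data end_ end_ le_rfl]
  simp only [List.nil_append, pairsFold, List.tail, List.zip, List.zipWith, List.foldl,
    mkOut, gBest]
  by_cases hgt : end_ - (cs - 1) - 1 > le - (ls - 1) - 1
  · rw [if_pos hgt, if_pos ⟨by omega, by omega⟩]
    norm_num
  · rw [if_neg hgt, if_neg (by omega)]
    norm_num

theorem aLoop_eq (data : List (Option Int)) (end_ : Int) :
    ∀ (fuel : ℕ) (c ls le cs : Int), (end_ - c).toNat ≤ fuel → cs ≤ c → c ≤ end_ → ls ≤ le →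
    aLoop data end_ fuel ls le cs c =
      mkOut (pairsFold ((cs - 1) :: (nonesIn data c end_ ++ [end_])) (ls - 1, le)) := by
  intro fuel
  induction fuel with
  | zero =>
    intro c ls le cs hfuel hcs hce hle
    have hc : c = end_ := by omega
    rw [hc, aLoop]
    exact exit_eq data end_ ls le cs (by omega) hle
  | succ fuel ih =>
    intro c ls le cs hfuel hcs hce hle
    rw [aLoop]
    by_cases h : c < end_
    · rw [if_pos h]
      by_cases hp : isPresent data c
      · rw [if_pos hp,
          ih (c + 1) ls le cs (by omega) (by omega) (by omega) hle,
          nones_cons_present data c end_ h hp]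
      · rw [if_neg hp]
        have hpf : isPresent data c = false := by simpa using hp
        have h1 : c + 1 ≤ aSkip data end_ ((end_ - (c + 1)).toNat) (c + 1) :=
          aSkip_ge data end_ ((end_ - (c + 1)).toNat) (c + 1)
        have h2 : aSkip data end_ ((end_ - (c + 1)).toNat) (c + 1) ≤ end_ :=
          aSkip_le data end_ ((end_ - (c + 1)).toNat) (c + 1) (by omega)
        have h3 := aSkip_none data end_ ((end_ - (c + 1)).toNat) (c + 1)
        set c' := aSkip data end_ ((end_ - (c + 1)).toNat) (c + 1) with hc'
        set ls' := if c - cs > le - ls then cs else ls with hls'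
        set le' := if c - cs > le - ls then c else le with hle'
        have hle2 : ls' ≤ le' := by
          rw [hls', hle']; split_ifs with hgt
          · omega
          · exact hle
        have hrw : nonesIn data c end_ =
            c :: (PySem.List.pyRange (c + 1) c' 1 ++ nonesIn data c' end_) := by
          rw [nones_cons_absent data c end_ h hpf,
            nones_split data (c + 1) c' end_ (by omega) h2,
            nones_all_absent data (c + 1) c' (fun i hi1 hi2 => h3 i hi1 hi2)]
        have hg : gBest (ls - 1, le) (cs - 1, c) = (ls' - 1, le') := by
          show (if c - (cs - 1) - 1 > le - (ls - 1) - 1 then ((cs : Int) - 1, c)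
              else (ls - 1, le)) = (ls' - 1, le')
          rw [hls', hle']
          by_cases hgt : c - cs > le - ls
          · rw [if_pos (by omega), if_pos hgt, if_pos hgt]
          · rw [if_neg (by omega), if_neg hgt, if_neg hgt]
        rw [ih c' ls' le' c' (by omega) le_rfl h2 hle2]
        congr 1
        have hlist : c :: (PySem.List.pyRange (c + 1) c' 1 ++ (nonesIn data c' end_ ++ [end_]))
            = PySem.List.pyRange c c' 1 ++ (nonesIn data c' end_ ++ [end_]) := by
          rw [PySem.List.pyRange_one_cons (show c < c' by omega), List.cons_append]
        rw [hrw, List.cons_append, List.append_assoc, pairsFold_cons₂, hg, hlist,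
          run_absorb c c' _ _ (by omega) (by omega)]
    · rw [if_neg h]
      have hc : c = end_ := by omega
      rw [hc]
      exact exit_eq data end_ ls le cs (by omega) hle

theorem alt_eq (data : List (Option Int)) (start end_ : Int) :
    findLongestContinuousStretch_alt data start end_ =
      mkOut (pairsFold ((start - 1) :: (nonesIn data start end_ ++ [end_])) (start - 1, start)) := by
  simp only [findLongestContinuousStretch_alt, PySem.List.foldl_append_if_eq_filter,
    PySem.List.slice_from_one]
  rfl

theorem nones_empty_case (data : List (Option Int)) (start end_ : Int) (h : end_ ≤ start) :
    findLongestContinuousStretch_alt data start end_ = [start, start] := by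
  rw [alt_eq, nones_nil data start end_ h]
  simp only [List.nil_append, pairsFold, List.tail, List.zip, List.zipWith, List.foldl,
    mkOut, gBest]
  rw [if_neg (by omega)]
  norm_num

-- ===== VERDICT (by name: the statement is the Claim_ definition above) =====
theorem findLongestContinuousStretch_spec : Claim_equal_findLongestContinuousStretch := by
  intro data start end_ _ _
  unfold Spec_findLongestContinuousStretch findLongestContinuousStretch
  by_cases h : start ≤ end_
  · rw [aLoop_eq data end_ ((end_ - start).toNat) start start start start le_rfl le_rfl h le_rfl,
      alt_eq]
  · have hz : ((end_ - start).toNat) = 0 := by omega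
    rw [hz, aLoop, if_neg (by omega), nones_empty_case data start end_ (by omega)]
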